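-- pv_equiv track=rewrite | github.com/edvardwd/Kattis | shuffling/main.py | outShuffle
-- ===== SOURCE A (Python) =====
-- def outShuffle(deck: list[int]) -> list[int]:
--     middle = len(deck) // 2 + (len(deck) % 2)
--     shuffled = []
--     topHalf = deck[:middle]
--     bottomHalf = deck[middle:]
--
--     while len(bottomHalf) > 0:
--         shuffled.append(topHalf.pop(0))
--         shuffled.append(bottomHalf.pop(0))
--     if len(topHalf) > 0:
--         shuffled += topHalf
--     return shuffled
-- ===== SOURCE B (Python) =====
-- def outShuffle(deck: list[int]) -> list[int]:
--     middle = (len(deck) + 1) // 2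
--     return [deck[j // 2] if j % 2 == 0 else deck[middle + j // 2]
--             for j in range(len(deck))]
-- ===== Notes on version B (the rewrite author's own statement) =====
-- stated objective: simpler
-- what changed: Replaces the two-pointer consumption of two sliced halves (repeated pop(0) plus a leftover append) by a single comprehension over output positions that reads deck[j//2] or deck[middle+j//2] by index arithmetic, building the result in one pass with no auxiliary lists.
import Mathlib
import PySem

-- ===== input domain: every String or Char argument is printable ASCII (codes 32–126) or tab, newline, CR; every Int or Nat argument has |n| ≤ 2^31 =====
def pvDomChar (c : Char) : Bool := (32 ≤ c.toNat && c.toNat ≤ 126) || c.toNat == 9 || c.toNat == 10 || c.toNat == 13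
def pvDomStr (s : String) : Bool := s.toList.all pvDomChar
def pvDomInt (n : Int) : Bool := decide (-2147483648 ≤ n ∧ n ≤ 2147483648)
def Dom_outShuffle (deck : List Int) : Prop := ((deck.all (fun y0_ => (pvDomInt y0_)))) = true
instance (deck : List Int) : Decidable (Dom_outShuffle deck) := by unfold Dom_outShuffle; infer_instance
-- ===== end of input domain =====

-- B builds the out-shuffle in one index-arithmetic pass over output positions instead of
-- consuming two sliced halves by repeated pop(0); objective: simpler (and asymptotically faster).


-- ===== PORT A =====
-- the while loop: pop the front of both halves while bottomHalf is nonempty, then append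
-- the (possibly empty) remaining topHalf.  topHalf is never empty while bottomHalf is
-- nonempty (middle = ceil(n/2)), so the [] branch below is unreachable dead code.
def outShuffleLoop : List Int → List Int → List Int → List Int
  | top, [], shuffled => if top.length > 0 then shuffled ++ top else shuffled
  | top, b :: bs, shuffled =>
      match top with
      | [] => shuffled            -- unreachable (Python would raise IndexError here)
      | t :: ts => outShuffleLoop ts bs (shuffled ++ [t] ++ [b])

def outShuffle (deck : List Int) : List Int :=
  -- middle = len(deck) // 2 + len(deck) % 2 (lengths are nonnegative, so Nat ops are exact)
  let middle := deck.length / 2 + deck.length % 2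
  -- deck[:middle] / deck[middle:] with 0 ≤ middle ≤ len(deck): exactly take/drop
  outShuffleLoop (deck.take middle) (deck.drop middle) []

-- ===== PORT B =====
def outShuffle_alt (deck : List Int) : List Int :=
  let middle := (deck.length + 1) / 2
  -- deck[i] for 0 ≤ i < len(deck): exactly getD (default never used)
  (List.range deck.length).map fun j =>
    if j % 2 = 0 then deck.getD (j / 2) 0 else deck.getD (middle + j / 2) 0

-- ===== PRECONDITION & SPEC =====
def Spec_outShuffle (deck : List Int) (out : List Int) : Prop := out = outShuffle_alt deck
instance (deck : List Int) (out : List Int) : Decidable (Spec_outShuffle deck out) := by unfold Spec_outShuffle; infer_instance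

-- ===== CLAIM (what is proved, stated in full; the proofs are below) =====
def Claim_equal_outShuffle : Prop := ∀ (deck : List Int), Dom_outShuffle deck → Spec_outShuffle deck (outShuffle deck)

-- ===== LEMMAS AND PROOFS =====

/-- the interleaving A computes, without the accumulator -/
def il : List Int → List Int → List Int
  | ts, [] => ts
  | ts, b :: bs =>
      match ts with
      | [] => []
      | t :: ts' => t :: b :: il ts' bs

theorem outShuffleLoop_eq_il (bs : List Int) : ∀ (ts acc : List Int),
    outShuffleLoop ts bs acc = acc ++ il ts bs := by
  induction bs with
  | nil =>
    intro ts acc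
    cases ts <;> simp [outShuffleLoop, il]
  | cons b bs ih =>
    intro ts acc
    cases ts with
    | nil => simp [outShuffleLoop, il]
    | cons t ts' => simp [outShuffleLoop, il, ih]

theorem il_length (bs : List Int) : ∀ ts : List Int, bs.length ≤ ts.length →
    (il ts bs).length = ts.length + bs.length := by
  induction bs with
  | nil => intro ts _; simp [il]
  | cons b bs ih =>
    intro ts h
    cases ts with
    | nil => simp at h
    | cons t ts' =>
      simp only [il, List.length_cons]
      have := ih ts' (by simpa using h)
      omega

theorem il_getD (bs : List Int) : ∀ (ts : List Int) (i : Nat),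
    bs.length ≤ ts.length → ts.length ≤ bs.length + 1 →
    (il ts bs).getD i 0 =
      if i % 2 = 0 then ts.getD (i / 2) 0 else bs.getD (i / 2) 0 := by
  induction bs with
  | nil =>
    intro ts i h1 h2
    match ts with
    | [] => cases i <;> simp [il, List.getD]
    | [t] =>
      match i with
      | 0 => simp [il]
      | 1 => simp [il, List.getD]
      | (n + 2) =>
        have : (n + 2) / 2 = n / 2 + 1 := by omega
        rcases Nat.even_or_odd n with he | ho <;>
          simp [il, List.getD, this]
    | t :: t' :: ts' => simp at h2
  | cons b bs ih =>
    intro ts i h1 h2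
    match ts with
    | [] => simp at h1
    | t :: ts' =>
      match i with
      | 0 => simp [il]
      | 1 => simp [il]
      | (n + 2) =>
        have e1 : (n + 2) % 2 = n % 2 := by omega
        have e2 : (n + 2) / 2 = n / 2 + 1 := by omega
        have := ih ts' n (by simpa using h1) (by simpa using h2)
        simp only [il, List.getD_cons_succ, this, e1, e2]

theorem outShuffle_alt_eq_il (deck : List Int) :
    outShuffle_alt deck = il (deck.take ((deck.length + 1) / 2))
                             (deck.drop ((deck.length + 1) / 2)) := by
  set n := deck.length with hn
  set m := (n + 1) / 2 with hm
  have hmn : m ≤ n := by omega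
  have hlt : (deck.take m).length = m := by rw [List.length_take]; omega
  have hld : (deck.drop m).length = n - m := by simp [hn]
  have h1 : (deck.drop m).length ≤ (deck.take m).length := by omega
  have h2 : (deck.take m).length ≤ (deck.drop m).length + 1 := by omega
  apply List.ext_getElem
  · simp [outShuffle_alt, il_length _ _ h1, hlt, hld, ← hn, ← hm]; omega
  · intro i hi hi'
    have hin : i < n := by simpa [outShuffle_alt, ← hn, ← hm] using hi
    have hr : (il (deck.take m) (deck.drop m))[i] =
        (il (deck.take m) (deck.drop m)).getD i 0 :=
      (List.getD_eq_getElem _ _ hi').symm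
    rw [hr, il_getD _ _ _ h1 h2]
    simp only [outShuffle_alt, ← hn, ← hm, List.getElem_map, List.getElem_range]
    split
    · next hev =>
      have hhalf : i / 2 < m := by omega
      rw [List.getD_eq_getElem _ _ (by omega : i / 2 < deck.length),
          List.getD_eq_getElem _ _ (by omega : i / 2 < (deck.take m).length),
          List.getElem_take]
    · next hod =>
      have h2' : i % 2 = 1 := by omega
      have hhalf : i / 2 < n - m := by omega
      rw [List.getD_eq_getElem _ _ (by omega : m + i / 2 < deck.length),
          List.getD_eq_getElem _ _ (by rw [hld]; omega : i / 2 < (deck.drop m).length),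
          List.getElem_drop]

-- ===== VERDICT (by name: the statement is the Claim_ definition above) =====
theorem outShuffle_spec : Claim_equal_outShuffle := by
  intro deck _
  have hmid : deck.length / 2 + deck.length % 2 = (deck.length + 1) / 2 := by omega
  show outShuffle deck = outShuffle_alt deck
  rw [outShuffle_alt_eq_il]
  simp only [outShuffle, hmid, outShuffleLoop_eq_il, List.nil_append]
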